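-- pv_equiv track=rewrite | github.com/cristalgonz751/introduccion_a_python | python_folder/semana4/ranking.py | ocurrencias
-- ===== SOURCE A (Python) =====
-- def ocurrencias(ordenada):
--     repetidas=[]
--     contar=1
--     while ordenada!=[]:
--         palabra=ordenada.pop(0)
--         if palabra in ordenada and contar<max_ocurren:
--             contar+=1
--         else:
--             repetidas.append((palabra,contar))
--             contar=1
--     return repetidas
--
-- max_ocurren=2				#pasarle el maximo de ocurrencias
-- ===== SOURCE B (Python) =====
-- max_ocurren = 2				#pasarle el maximo de ocurrencias
--
-- def ocurrencias(ordenada):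
--     # one reverse pass with a set: flags[i] = word i occurs again later (O(n) total)
--     seen = set()
--     flags = []
--     for w in reversed(ordenada):
--         flags.append(w in seen)
--         seen.add(w)
--     flags.reverse()
--     # one forward pass of the counting state machine over the precomputed flags
--     repetidas = []
--     contar = 1
--     for w, f in zip(ordenada, flags):
--         if f and contar < max_ocurren:
--             contar += 1
--         else:
--             repetidas.append((w, contar))
--             contar = 1
--     return repetidas
-- ===== Notes on version B (the rewrite author's own statement) =====
-- stated objective: faster
-- what changed: A rescans the remaining list for each word ('palabra in ordenada', O(n) per step); B precomputes in one reverse pass with a set a flag per position saying whether the word occurs again later, then runs the counting state machine in a single forward pass over the zipped flags.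
import Mathlib
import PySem

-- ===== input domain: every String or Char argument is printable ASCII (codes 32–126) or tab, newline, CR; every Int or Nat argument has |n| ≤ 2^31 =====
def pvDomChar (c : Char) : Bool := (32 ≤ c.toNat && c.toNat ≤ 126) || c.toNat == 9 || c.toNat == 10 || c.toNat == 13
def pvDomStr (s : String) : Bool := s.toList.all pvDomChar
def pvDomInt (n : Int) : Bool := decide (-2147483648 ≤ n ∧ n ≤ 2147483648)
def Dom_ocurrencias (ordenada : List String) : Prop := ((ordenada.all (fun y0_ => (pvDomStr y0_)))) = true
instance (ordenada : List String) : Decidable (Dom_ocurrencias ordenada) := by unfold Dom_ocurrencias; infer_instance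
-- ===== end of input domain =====

-- B replaces A's per-step rescan of the remaining list by a precomputed later-occurrence
-- flag per position (one reverse pass with a set), making it O(n) instead of O(n^2).
-- Equivalence is about the RETURN value: Python A empties its argument list in place, B does not mutate it.

def max_ocurren : Int := 2

-- ===== PORT A =====
def ocurrenciasLoop : List String → List (String × Int) → Int → List (String × Int)
  | [], repetidas, _ => repetidas
  | palabra :: rest, repetidas, contar =>
    if palabra ∈ rest ∧ contar < max_ocurren then
      ocurrenciasLoop rest repetidas (contar + 1)
    else
      ocurrenciasLoop rest (repetidas ++ [(palabra, contar)]) 1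

def ocurrencias (ordenada : List String) : List (String × Int) :=
  ocurrenciasLoop ordenada [] 1

-- ===== PORT B =====
def ocurrencias_alt (ordenada : List String) : List (String × Int) :=
  -- reverse pass: seen-set, flags appended (flag = word occurs again later)
  let p := ordenada.reverse.foldl
      (fun (p : List Bool × PySem.Set String) w =>
        (p.1 ++ [PySem.Set.contains p.2 w], PySem.Set.add p.2 w))
      ([], PySem.Set.empty)
  let flags := p.1.reverse
  -- forward pass: counting state machine over the zipped flags
  let q := (ordenada.zip flags).foldl
      (fun (q : List (String × Int) × Int) wf =>
        if wf.2 && decide (q.2 < max_ocurren) then (q.1, q.2 + 1)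
        else (q.1 ++ [(wf.1, q.2)], 1))
      ([], 1)
  q.1

-- ===== PRECONDITION & SPEC =====
def Spec_ocurrencias (ordenada : List String) (out : List (String × Int)) : Prop := out = ocurrencias_alt ordenada
instance (ordenada : List String) (out : List (String × Int)) : Decidable (Spec_ocurrencias ordenada out) := by unfold Spec_ocurrencias; infer_instance

-- ===== CLAIM (what is proved, stated in full; the proofs are below) =====
def Claim_equal_ocurrencias : Prop := ∀ (ordenada : List String), Dom_ocurrencias ordenada → Spec_ocurrencias ordenada (ocurrencias ordenada)

-- ===== LEMMAS AND PROOFS =====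

-- flags produced by B's reverse pass, starting from seen-set s
def flagsFrom (s : PySem.Set String) : List String → List Bool
  | [] => []
  | w :: ws => PySem.Set.contains s w :: flagsFrom (PySem.Set.add s w) ws

-- flags in the original order: position i says "the word occurs again later"
def flagsF : List String → List Bool
  | [] => []
  | x :: r => decide (x ∈ r) :: flagsF r

theorem foldl_flags_eq (ys : List String) (acc : List Bool) (s : PySem.Set String) :
    (ys.foldl
      (fun (p : List Bool × PySem.Set String) w =>
        (p.1 ++ [PySem.Set.contains p.2 w], PySem.Set.add p.2 w))
      (acc, s)).1 = acc ++ flagsFrom s ys := by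
  induction ys generalizing acc s with
  | nil => simp [flagsFrom]
  | cons w ws ih =>
    rw [List.foldl_cons, ih]
    simp [flagsFrom]

theorem flagsFrom_append (a b : List String) (s : PySem.Set String) :
    flagsFrom s (a ++ b) = flagsFrom s a ++ flagsFrom (a.foldl PySem.Set.add s) b := by
  induction a generalizing s with
  | nil => simp [flagsFrom]
  | cons x xs ih => simp [flagsFrom, ih]

theorem contains_foldl_add_empty (ys : List String) (x : String) :
    PySem.Set.contains (ys.foldl PySem.Set.add PySem.Set.empty) x = decide (x ∈ ys) := by
  have h : ys.foldl PySem.Set.add PySem.Set.empty = PySem.Set.ofList ys :=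
    (PySem.Set.ofList_eq_foldl ys).symm
  rw [h]
  simp [pysem]

theorem flagsFrom_reverse (xs : List String) :
    (flagsFrom PySem.Set.empty xs.reverse).reverse = flagsF xs := by
  induction xs with
  | nil => simp [flagsFrom, flagsF]
  | cons x r ih =>
    rw [List.reverse_cons, flagsFrom_append,
      show flagsFrom ((r.reverse).foldl PySem.Set.add PySem.Set.empty) [x] = [decide (x ∈ r)] from by
        rw [flagsFrom, contains_foldl_add_empty]; simp [flagsFrom]]
    simp [flagsF]
    exact ih

theorem foldl_machine_eq (xs : List String) (acc : List (String × Int)) (c : Int) :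
    ((xs.zip (flagsF xs)).foldl
      (fun (q : List (String × Int) × Int) wf =>
        if wf.2 && decide (q.2 < max_ocurren) then (q.1, q.2 + 1)
        else (q.1 ++ [(wf.1, q.2)], 1))
      (acc, c)).1 = ocurrenciasLoop xs acc c := by
  induction xs generalizing acc c with
  | nil => simp [flagsF, ocurrenciasLoop]
  | cons x r ih =>
    simp only [flagsF, List.zip_cons_cons, List.foldl_cons, ocurrenciasLoop]
    by_cases hm : x ∈ r
    · by_cases hc : c < max_ocurren
      · rw [if_pos (by simp [hm, hc]), if_pos ⟨hm, hc⟩]; exact ih acc (c + 1)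
      · rw [if_neg (by simp [hc]), if_neg (fun hh => hc hh.2)]; exact ih _ 1
    · rw [if_neg (by simp [hm]), if_neg (fun hh => hm hh.1)]; exact ih _ 1

-- ===== VERDICT (by name: the statement is the Claim_ definition above) =====
theorem ocurrencias_spec : Claim_equal_ocurrencias := by
  intro ordenada _
  show ocurrencias ordenada = ocurrencias_alt ordenada
  unfold ocurrencias ocurrencias_alt
  dsimp only
  rw [foldl_flags_eq, List.nil_append, flagsFrom_reverse, foldl_machine_eq]
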